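-- pv_equiv track=rewrite | github.com/Kenobichek/Decision-Theory-Course | lab4/voting_methods.py | copeland_voting
-- ===== SOURCE A (Python) =====
-- from collections import Counter
--
-- def copeland_voting(profile):
--     copeland_points = Counter()
--     for i in range(len(profile)):
--         for j in range(i + 1, len(profile)):
--             for candidate in profile[i][0]:
--                 if candidate in profile[j][0]:
--                     copeland_points[candidate] += profile[i][1]
--                 elif candidate not in copeland_points:
--                     copeland_points[candidate] = 0
--
--     winner = max(copeland_points, key=copeland_points.get)
--     return winner
-- ===== SOURCE B (Python) =====
-- from collections import Counter
--
-- def copeland_voting(profile):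
--     # remaining[c] = how many ballots (not yet passed) contain c; built once up front.
--     remaining = Counter()
--     for ballot, _ in profile:
--         remaining.update(set(ballot))
--     score = {}
--     # The last ballot faces no later ballots, so it contributes nothing: skip it.
--     for ballot, weight in profile[:-1]:
--         for c in set(ballot):
--             remaining[c] -= 1          # remaining = ballots strictly after this one
--         for c in ballot:
--             score[c] = score.get(c, 0) + weight * remaining[c]
--     return max(score, key=score.get)
-- ===== Notes on version B (the rewrite author's own statement) =====
-- stated objective: faster
-- what changed: A scores every ordered pair of ballots (triple nested loop); B precomputes per-candidate ballot-containment counts once and then makes a single forward pass, decrementing the count so each ballot is scored against its running 'remaining later ballots' count, eliminating the pairwise inner scan.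
import Mathlib
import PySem

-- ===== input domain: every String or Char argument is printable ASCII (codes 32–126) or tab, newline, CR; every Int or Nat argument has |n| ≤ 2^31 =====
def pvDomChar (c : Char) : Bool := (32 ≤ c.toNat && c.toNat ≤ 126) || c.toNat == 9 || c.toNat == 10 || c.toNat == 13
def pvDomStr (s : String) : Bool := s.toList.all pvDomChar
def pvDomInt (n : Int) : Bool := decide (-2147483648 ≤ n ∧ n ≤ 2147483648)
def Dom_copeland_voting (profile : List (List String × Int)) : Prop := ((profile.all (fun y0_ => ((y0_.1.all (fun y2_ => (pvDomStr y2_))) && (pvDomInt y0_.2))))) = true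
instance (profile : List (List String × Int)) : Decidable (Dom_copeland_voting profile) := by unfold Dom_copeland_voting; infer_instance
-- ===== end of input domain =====

-- B replaces A's O(n²·c) all-pairs scan by one forward pass over precomputed per-candidate
-- containment counts (objective: faster, asymptotic).

-- ===== PORT A =====
def copeland_voting (profile : List (List String × Int)) : String :=
  let n : Int := PySem.List.len profile
  let pts : PySem.Dict String Int :=
    (PySem.List.pyRange 0 n).foldl (fun pts i =>
      (PySem.List.pyRange (i + 1) n).foldl (fun pts j =>
        (PySem.List.pyGetD profile i ([], 0)).1.foldl (fun pts c =>
          if (PySem.List.pyGetD profile j ([], 0)).1.contains c then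
            pts.insert c (pts.getD c 0 + (PySem.List.pyGetD profile i ([], 0)).2)
          else if pts.contains c then pts
          else pts.insert c 0) pts) pts) PySem.Dict.empty
  -- max(counter, key=counter.get): first key with maximal value; counter.get is exact as getD _ 0 on keys
  (PySem.List.max? pts.keys (fun c => pts.getD c 0)).getD ""

-- ===== PORT B =====
def copeland_voting_alt (profile : List (List String × Int)) : String :=
  let remaining : PySem.Dict String Int :=
    profile.foldl (fun r b =>
      (PySem.Set.ofList b.1).foldl (fun r c => r.insert c (r.getD c 0 + 1)) r) PySem.Dict.empty
  let st := (PySem.List.slice profile none (some (-1))).foldl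
    (fun (st : PySem.Dict String Int × PySem.Dict String Int) bw =>
      let rem := (PySem.Set.ofList bw.1).foldl (fun r c => r.insert c (r.getD c 0 - 1)) st.1
      let score := bw.1.foldl (fun sc c => sc.insert c (sc.getD c 0 + bw.2 * rem.getD c 0)) st.2
      (rem, score)) (remaining, PySem.Dict.empty)
  -- max(score, key=score.get): score.get is exact as getD _ 0 on score's keys
  (PySem.List.max? st.2.keys (fun c => st.2.getD c 0)).getD ""

-- ===== PRECONDITION & SPEC =====
-- Pre_ excludes exactly the inputs on which Python A raises ValueError (max() of an empty
-- Counter: no ballot before the last one has a nonempty candidate list); B raises there too.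
def Pre_copeland_voting (profile : List (List String × Int)) : Prop :=
  profile.dropLast.any (fun p => !p.1.isEmpty) = true
instance (profile : List (List String × Int)) : Decidable (Pre_copeland_voting profile) := by
  unfold Pre_copeland_voting; infer_instance
def pvWitness_copeland_voting : (List (List String × Int)) := [(["a"], 1), ([], 0)]

def Spec_copeland_voting (profile : List (List String × Int)) (out : String) : Prop := out = copeland_voting_alt profile
instance (profile : List (List String × Int)) (out : String) : Decidable (Spec_copeland_voting profile out) := by unfold Spec_copeland_voting; infer_instance

-- ===== CLAIM (what is proved, stated in full; the proofs are below) =====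
def Claim_equal_copeland_voting : Prop := ∀ (profile : List (List String × Int)), Dom_copeland_voting profile → Pre_copeland_voting profile → Spec_copeland_voting profile (copeland_voting profile)

-- ===== LEMMAS AND PROOFS =====

-- A's innermost per-candidate update
def cvStep (q : List String × Int) (w : Int) (d : PySem.Dict String Int) (c : String) : PySem.Dict String Int :=
  if q.1.contains c then d.insert c (d.getD c 0 + w)
  else if d.contains c then d
  else d.insert c 0

-- A's j-loop body for a fixed ballot x
def cvInner (x : List String × Int) (d : PySem.Dict String Int) (q : List String × Int) : PySem.Dict String Int :=
  x.1.foldl (cvStep q x.2) d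

-- A's i-loop, structurally: each ballot is scored against all later ballots
def cvLoop : PySem.Dict String Int → List (List String × Int) → PySem.Dict String Int
  | d, [] => d
  | d, x :: xs => cvLoop (xs.foldl (cvInner x) d) xs

-- the common mathematical score
def cvScore (l : List (List String × Int)) (c : String) : Int :=
  match l with
  | [] => 0
  | x :: xs => x.2 * (x.1.count c : Int) * (xs.countP (fun q => q.1.contains c) : Int) + cvScore xs c

-- B's fold body
def cvBStep (st : PySem.Dict String Int × PySem.Dict String Int) (bw : List String × Int) :
    PySem.Dict String Int × PySem.Dict String Int :=
  let rem := (PySem.Set.ofList bw.1).foldl (fun r c => r.insert c (r.getD c 0 - 1)) st.1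
  let score := bw.1.foldl (fun sc c => sc.insert c (sc.getD c 0 + bw.2 * rem.getD c 0)) st.2
  (rem, score)

-- B's score over the still-unprocessed ballots l, the fixed tail T after them
def cvScoreT (T : List (List String × Int)) : List (List String × Int) → String → Int
  | [], _ => 0
  | x :: xs, c => x.2 * (x.1.count c : Int) * (((xs ++ T).countP (fun q => q.1.contains c)) : Int)
      + cvScoreT T xs c

theorem keys_cvStep (q : List String × Int) (w : Int) (d : PySem.Dict String Int) (c : String) :
    (cvStep q w d c).keys = PySem.Set.add d.keys c := by
  unfold cvStep PySem.Set.add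
  by_cases hc : c ∈ d.keys
  · have hc' : d.contains c = true := (PySem.Dict.contains_iff_mem_keys d c).mpr hc
    by_cases hq : c ∈ q.1 <;>
      simp [hc, hc', hq, PySem.Dict.keys_insert_of_contains d _ hc']
  · have hc' : d.contains c = false := by
      rw [Bool.eq_false_iff]; intro h; exact hc ((PySem.Dict.contains_iff_mem_keys d c).mp h)
    by_cases hq : c ∈ q.1 <;>
      simp [hc, hc', hq, PySem.Dict.keys_insert_of_not_contains d _ hc']

theorem getD_cvStep (q : List String × Int) (w : Int) (d : PySem.Dict String Int) (c x : String) :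
    (cvStep q w d c).getD x 0 = d.getD x 0 + (if x = c then (if q.1.contains c then w else 0) else 0) := by
  unfold cvStep
  by_cases hc : d.contains c = true
  · by_cases hq : c ∈ q.1 <;> by_cases hx : x = c <;>
      simp [hq, hc, hx, PySem.Dict.getD_insert]
  · have h0 : d.getD c 0 = 0 := PySem.Dict.getD_of_not_contains d 0 (by simpa using hc)
    by_cases hq : c ∈ q.1 <;> by_cases hx : x = c <;>
      simp [hq, hc, hx, PySem.Dict.getD_insert, h0]

theorem getD_cfold (q : List String × Int) (w : Int) (b : List String) (d : PySem.Dict String Int) (x : String) :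
    (b.foldl (cvStep q w) d).getD x 0 = d.getD x 0 + (if q.1.contains x then w else 0) * (b.count x : Int) := by
  induction b generalizing d with
  | nil => simp
  | cons a b ih =>
    rw [List.foldl_cons, ih, getD_cvStep, List.count_cons]
    by_cases hx : x = a
    · subst hx
      simp only [if_true, beq_self_eq_true]
      push_cast
      ring
    · have : (a == x) = false := by simp [Ne.symm hx]
      simp [hx, this]

theorem keys_cfold (q : List String × Int) (w : Int) (b : List String) (d : PySem.Dict String Int) :
    (b.foldl (cvStep q w) d).keys = PySem.Set.update d.keys b := by
  induction b generalizing d with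
  | nil => rfl
  | cons a b ih =>
    rw [List.foldl_cons, ih]
    show _ = (a :: b).foldl PySem.Set.add d.keys
    rw [List.foldl_cons, keys_cvStep]
    rfl

theorem update_of_subset {s : PySem.Set String} {b : List String} (h : ∀ y ∈ b, y ∈ s) :
    PySem.Set.update s b = s := by
  induction b generalizing s with
  | nil => rfl
  | cons a b ih =>
    show (a :: b).foldl PySem.Set.add s = s
    rw [List.foldl_cons]
    have ha : PySem.Set.add s a = s := by
      unfold PySem.Set.add
      rw [show PySem.Set.contains s a = true from List.contains_iff_mem.mpr (h a (by simp)), if_pos rfl]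
    rw [ha]
    exact ih (fun y hy => h y (by simp [hy]))

theorem update_idem (s : PySem.Set String) (b : List String) :
    PySem.Set.update (PySem.Set.update s b) b = PySem.Set.update s b :=
  update_of_subset (fun y hy => (PySem.Set.mem_update s b y).mpr (Or.inr hy))

theorem getD_jfold (x : List String × Int) (rest : List (List String × Int)) (d : PySem.Dict String Int) (c : String) :
    (rest.foldl (cvInner x) d).getD c 0
      = d.getD c 0 + x.2 * (x.1.count c : Int) * (rest.countP (fun q => q.1.contains c) : Int) := by
  induction rest generalizing d with
  | nil => simp
  | cons q rest ih =>
    rw [List.foldl_cons, ih]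
    show (cvInner x d q).getD c 0 + _ = _
    unfold cvInner
    rw [getD_cfold, List.countP_cons]
    by_cases hq : c ∈ q.1 <;> simp [hq]
    ring

theorem keys_jfold (x : List String × Int) (rest : List (List String × Int)) (d : PySem.Dict String Int) :
    (rest.foldl (cvInner x) d).keys = if rest.isEmpty then d.keys else PySem.Set.update d.keys x.1 := by
  induction rest generalizing d with
  | nil => simp
  | cons q rest ih =>
    rw [List.foldl_cons, ih]
    show (if rest.isEmpty then (cvInner x d q).keys else _) = _
    unfold cvInner
    rw [keys_cfold]
    cases rest <;> simp [update_idem]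

theorem getD_cvLoop (l : List (List String × Int)) : ∀ (d : PySem.Dict String Int) (c : String),
    (cvLoop d l).getD c 0 = d.getD c 0 + cvScore l c := by
  induction l with
  | nil => intro d c; simp [cvLoop, cvScore]
  | cons x xs ih =>
    intro d c
    show (cvLoop (xs.foldl (cvInner x) d) xs).getD c 0 = _
    rw [ih, getD_jfold,
      show cvScore (x :: xs) c
        = x.2 * (x.1.count c : Int) * (xs.countP (fun q => q.1.contains c) : Int) + cvScore xs c from rfl]
    ring

theorem keys_cvLoop (l : List (List String × Int)) : ∀ (d : PySem.Dict String Int),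
    (cvLoop d l).keys = PySem.Set.update d.keys (l.dropLast.flatMap (·.1)) := by
  induction l with
  | nil => intro d; rfl
  | cons x xs ih =>
    intro d
    show (cvLoop (xs.foldl (cvInner x) d) xs).keys = _
    rw [ih, keys_jfold]
    cases xs with
    | nil => rfl
    | cons y ys =>
      show PySem.Set.update (PySem.Set.update d.keys x.1) ((y :: ys).dropLast.flatMap (·.1)) = _
      rw [show ((x :: y :: ys).dropLast.flatMap (·.1)) = x.1 ++ ((y :: ys).dropLast.flatMap (·.1)) by simp]
      show _ = (x.1 ++ _).foldl PySem.Set.add d.keys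
      rw [List.foldl_append]
      rfl

theorem outer_eq (suf : List (List String × Int)) : ∀ (pre : List (List String × Int)) (d : PySem.Dict String Int),
    (PySem.List.pyRange (pre.length : Int) (((pre ++ suf).length : Nat) : Int)).foldl (fun pts i =>
      (PySem.List.pyRange (i + 1) (((pre ++ suf).length : Nat) : Int)).foldl (fun pts j =>
        (PySem.List.pyGetD (pre ++ suf) i ([], 0)).1.foldl (fun pts c =>
          if (PySem.List.pyGetD (pre ++ suf) j ([], 0)).1.contains c then
            pts.insert c (pts.getD c 0 + (PySem.List.pyGetD (pre ++ suf) i ([], 0)).2)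
          else if pts.contains c then pts
          else pts.insert c 0) pts) pts) d
    = cvLoop d suf := by
  induction suf with
  | nil =>
    intro pre d
    rw [PySem.List.pyRange_one_eq_nil (by simp)]
    rfl
  | cons x xs ih =>
    intro pre d
    have hlt : (pre.length : Int) < (((pre ++ x :: xs).length : Nat) : Int) := by
      simp
    rw [PySem.List.pyRange_one_cons hlt]
    rw [List.foldl_cons]
    have hx : PySem.List.pyGetD (pre ++ x :: xs) (pre.length : Int) ([], 0) = x := by
      rw [PySem.List.pyGetD_natCast]
      simp [List.getD_eq_getElem?_getD]
    have hfirst :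
        (PySem.List.pyRange ((pre.length : Int) + 1) (((pre ++ x :: xs).length : Nat) : Int)).foldl
          (fun pts j =>
            x.1.foldl (fun pts c =>
              if (PySem.List.pyGetD (pre ++ x :: xs) j ([], 0)).1.contains c then
                pts.insert c (pts.getD c 0 + x.2)
              else if pts.contains c then pts
              else pts.insert c 0) pts) d
        = xs.foldl (cvInner x) d := by
      show List.foldl (fun pts j =>
          List.foldl (cvStep (PySem.List.pyGetD (pre ++ x :: xs) j ([], 0)) x.2) pts x.1) d
          (PySem.List.pyRange ((pre.length : Int) + 1) (((pre ++ x :: xs).length : Nat) : Int)) = _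
      rw [PySem.List.foldl_pyRange_pyGetD' (pre ++ x :: xs) ([], 0)
            (fun pts q => List.foldl (cvStep q x.2) pts x.1) d (a := (pre.length : Int) + 1) (by positivity)]
      rw [show ((pre.length : Int) + 1).toNat = pre.length + 1 by omega]
      rw [show pre ++ x :: xs = (pre ++ [x]) ++ xs by simp]
      rw [show pre.length + 1 = ((pre ++ [x]).length) by simp]
      rw [List.drop_left]
      rfl
    rw [hx, hfirst]
    have h2 := ih (pre ++ [x]) (xs.foldl (cvInner x) d)
    simp only [List.append_assoc, List.singleton_append, List.length_append,
      List.length_cons] at h2 ⊢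
    push_cast at h2 ⊢
    exact h2

theorem copeland_voting_eq_cvLoop (profile : List (List String × Int)) :
    copeland_voting profile
      = (PySem.List.max? (cvLoop PySem.Dict.empty profile).keys
          (fun c => (cvLoop PySem.Dict.empty profile).getD c 0)).getD "" := by
  have h := outer_eq profile [] PySem.Dict.empty
  simp only [List.nil_append, List.length_nil, Nat.cast_zero] at h
  exact congrArg
    (fun d : PySem.Dict String Int => (PySem.List.max? d.keys (fun c => d.getD c 0)).getD "") h

-- ===== B-side lemmas =====

theorem getD_scorefold (g : String → Int) (b : List String) (sc : PySem.Dict String Int) (x : String) :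
    (b.foldl (fun sc c => sc.insert c (sc.getD c 0 + g c)) sc).getD x 0
      = sc.getD x 0 + g x * (b.count x : Int) := by
  induction b generalizing sc with
  | nil => simp
  | cons a b ih =>
    rw [List.foldl_cons, ih, List.count_cons, PySem.Dict.getD_insert]
    by_cases hx : x = a
    · subst hx; simp; ring
    · have : (a == x) = false := by simp [Ne.symm hx]
      simp [hx, this]

theorem getD_decfold (b : List String) (r : PySem.Dict String Int) (x : String) :
    (b.foldl (fun r c => r.insert c (r.getD c 0 - 1)) r).getD x 0
      = r.getD x 0 - (b.count x : Int) := by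
  induction b generalizing r with
  | nil => simp
  | cons a b ih =>
    rw [List.foldl_cons, ih, List.count_cons, PySem.Dict.getD_insert]
    by_cases hx : x = a
    · subst hx; simp; ring
    · have : (a == x) = false := by simp [Ne.symm hx]
      simp [hx, this]

theorem count_dedup (b : List String) (x : String) :
    ((PySem.List.dedup b).count x : Int) = if b.contains x then 1 else 0 := by
  by_cases hx : x ∈ b
  · rw [List.count_eq_one_of_mem (PySem.List.nodup_dedup b) ((PySem.List.mem_dedup b x).mpr hx)]
    simp [hx]
  · rw [List.count_eq_zero_of_not_mem (fun h => hx ((PySem.List.mem_dedup b x).mp h))]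
    simp [hx]

theorem getD_remaining (l : List (List String × Int)) : ∀ (r : PySem.Dict String Int) (c : String),
    (l.foldl (fun r (b : List String × Int) =>
        (PySem.Set.ofList b.1).foldl (fun r c => r.insert c (r.getD c 0 + 1)) r) r).getD c 0
      = r.getD c 0 + (l.countP (fun q => q.1.contains c) : Int) := by
  induction l with
  | nil => intro r c; simp
  | cons x xs ih =>
    intro r c
    rw [List.foldl_cons, ih, ← PySem.List.dedup_eq_ofList,
        PySem.Dict.getD_foldl_insert_add_one, List.countP_cons]
    push_cast [count_dedup]
    by_cases hx : c ∈ x.1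
    · simp [hx]
      ring
    · simp [hx]

theorem getD_remfold (b : List String) (r : PySem.Dict String Int) (x : String) :
    ((PySem.Set.ofList b).foldl (fun r c => r.insert c (r.getD c 0 - 1)) r).getD x 0
      = r.getD x 0 - (if b.contains x then 1 else 0) := by
  rw [← PySem.List.dedup_eq_ofList, getD_decfold, count_dedup]

theorem bloop_score (T : List (List String × Int)) (l : List (List String × Int)) :
    ∀ (r sc : PySem.Dict String Int),
      (∀ c, r.getD c 0 = (((l ++ T).countP (fun q => q.1.contains c)) : Int)) →
      ∀ c, ((l.foldl cvBStep (r, sc)).2).getD c 0 = sc.getD c 0 + cvScoreT T l c := by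
  induction l with
  | nil => intro r sc _ c; simp [cvScoreT]
  | cons x xs ih =>
    intro r sc hr c
    rw [List.foldl_cons]
    show ((xs.foldl cvBStep (cvBStep (r, sc) x)).2).getD c 0 = _
    have hrem : ∀ c, ((PySem.Set.ofList x.1).foldl (fun r c => r.insert c (r.getD c 0 - 1)) r).getD c 0
        = (((xs ++ T).countP (fun q => q.1.contains c)) : Int) := by
      intro c
      rw [getD_remfold, hr c]
      rw [show (x :: xs) ++ T = x :: (xs ++ T) from rfl, List.countP_cons]
      by_cases hx : c ∈ x.1 <;> simp [hx]
    have hstep : cvBStep (r, sc) x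
        = ((PySem.Set.ofList x.1).foldl (fun r c => r.insert c (r.getD c 0 - 1)) r,
           x.1.foldl (fun sc c => sc.insert c (sc.getD c 0 +
             x.2 * ((PySem.Set.ofList x.1).foldl (fun r c => r.insert c (r.getD c 0 - 1)) r).getD c 0)) sc) := rfl
    rw [hstep, ih _ _ hrem c]
    rw [getD_scorefold (g := fun c => x.2 *
          ((PySem.Set.ofList x.1).foldl (fun r c => r.insert c (r.getD c 0 - 1)) r).getD c 0)]
    rw [hrem c]
    show _ = sc.getD c 0 + (x.2 * (x.1.count c : Int) * (((xs ++ T).countP (fun q => q.1.contains c)) : Int)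
        + cvScoreT T xs c)
    ring

theorem bloop_keys (l : List (List String × Int)) :
    ∀ (st : PySem.Dict String Int × PySem.Dict String Int),
      ((l.foldl cvBStep st).2).keys = PySem.Set.update st.2.keys (l.flatMap (·.1)) := by
  induction l with
  | nil => intro st; rfl
  | cons x xs ih =>
    intro st
    rw [List.foldl_cons, ih]
    simp only [cvBStep]
    rw [PySem.Dict.keys_foldl_insert]
    rw [show ((x :: xs).flatMap (·.1)) = x.1 ++ xs.flatMap (·.1) by simp,
        PySem.Set.update_append]

theorem cvScore_concat (l : List (List String × Int)) (t : List String × Int) (c : String) :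
    cvScore (l ++ [t]) c = cvScoreT [t] l c := by
  induction l with
  | nil => simp [cvScore, cvScoreT]
  | cons x xs ih => simp [cvScore, cvScoreT, ih]

theorem slice_dropLast (profile : List (List String × Int)) :
    PySem.List.slice profile none (some (-1)) = profile.dropLast := by
  simp [PySem.List.slice]
  rw [List.dropLast_eq_take]

theorem copeland_voting_alt_eq (profile : List (List String × Int)) :
    copeland_voting_alt profile
      = (PySem.List.max? (PySem.Set.ofList (profile.dropLast.flatMap (·.1)))
          (fun c => cvScore profile c)).getD "" := by
  rcases List.eq_nil_or_concat profile with rfl | ⟨l, t, rfl⟩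
  · rfl
  · rw [List.concat_eq_append]
    have hr : ∀ c, ((l ++ [t]).foldl (fun r (b : List String × Int) =>
        (PySem.Set.ofList b.1).foldl (fun r c => r.insert c (r.getD c 0 + 1)) r)
          PySem.Dict.empty).getD c 0
        = (((l ++ [t]).countP (fun q => q.1.contains c)) : Int) := by
      intro c; rw [getD_remaining]; simp [PySem.Dict.getD_empty]
    show (PySem.List.max? (((PySem.List.slice (l ++ [t]) none (some (-1))).foldl cvBStep
        ((l ++ [t]).foldl (fun r (b : List String × Int) =>
          (PySem.Set.ofList b.1).foldl (fun r c => r.insert c (r.getD c 0 + 1)) r) PySem.Dict.empty,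
         PySem.Dict.empty)).2).keys
        (fun c => (((PySem.List.slice (l ++ [t]) none (some (-1))).foldl cvBStep
        ((l ++ [t]).foldl (fun r (b : List String × Int) =>
          (PySem.Set.ofList b.1).foldl (fun r c => r.insert c (r.getD c 0 + 1)) r) PySem.Dict.empty,
         PySem.Dict.empty)).2).getD c 0)).getD "" = _
    rw [slice_dropLast]
    rw [show (l ++ [t]).dropLast = l by simp]
    rw [bloop_keys]
    rw [show (fun c => ((l.foldl cvBStep
        ((l ++ [t]).foldl (fun r (b : List String × Int) =>
          (PySem.Set.ofList b.1).foldl (fun r c => r.insert c (r.getD c 0 + 1)) r) PySem.Dict.empty,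
         PySem.Dict.empty)).2).getD c 0)
        = fun c => cvScore (l ++ [t]) c from funext fun c => by
          rw [bloop_score [t] l _ _ hr c, cvScore_concat]
          simp [PySem.Dict.getD_empty]]
    rfl

-- ===== VERDICT (by name: the statement is the Claim_ definition above) =====
theorem copeland_voting_spec : Claim_equal_copeland_voting := by
  intro profile _ _
  unfold Spec_copeland_voting
  rw [copeland_voting_eq_cvLoop, copeland_voting_alt_eq, keys_cvLoop]
  rw [show PySem.Dict.empty.keys = ([] : List String) from rfl]
  rw [show PySem.Set.update ([] : PySem.Set String) (profile.dropLast.flatMap (·.1))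
        = PySem.Set.ofList (profile.dropLast.flatMap (·.1)) from rfl]
  rw [show (fun c => (cvLoop PySem.Dict.empty profile).getD c 0) = fun c => cvScore profile c from
      funext (fun c => by rw [getD_cvLoop]; simp [PySem.Dict.getD_empty])]
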